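-- pv_equiv track=rewrite | github.com/khm9888/projects | personal_project/2019/학원 및 과외/학생들자료/이택용/이택용(20년도)/10월3주/brush_strokes.py | brush_strokes
-- ===== SOURCE A (Python) =====
-- def floors(apartments):
--     answer = []
--     max_floor = max(apartments)#4
--     for heigth in range(1,max_floor+1):#1~4
--         floor=[]
--         for order in range(len(apartments)):
--             if apartments[order] >= heigth:
--                 floor.append(True)
--             else:
--                 floor.append(False)
--         answer.insert(0,floor)
--     return answer
--
-- def brush_strokes(apartments):
--     values=floors(apartments)
--     total=0
--     for v in values:
--         cnt=0
--         for i,bool_v in enumerate(v[:-1]):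
--             if not bool_v:
--                 pass
--             elif bool_v and (v[i+1]==False or len(v[:-1])-1==i):
--                 cnt+=1
--         if v[-1] and not v[-2]:
--             cnt+=1
--         total+=cnt
--     return total
-- ===== SOURCE B (Python) =====
-- def brush_strokes(apartments):
--     total = 0
--     prev = 0
--     for h in apartments:
--         h = max(h, 0)
--         if h > prev:
--             total += h - prev
--         prev = h
--     return total
-- ===== Notes on version B (the rewrite author's own statement) =====
-- stated objective: faster
-- what changed: Replaces the row-by-row repainting simulation (build one boolean row per height level and count runs of True in each row) with a single left-to-right pass adding max(0, height[i]-height[i-1]) with heights clamped at 0.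
import Mathlib
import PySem

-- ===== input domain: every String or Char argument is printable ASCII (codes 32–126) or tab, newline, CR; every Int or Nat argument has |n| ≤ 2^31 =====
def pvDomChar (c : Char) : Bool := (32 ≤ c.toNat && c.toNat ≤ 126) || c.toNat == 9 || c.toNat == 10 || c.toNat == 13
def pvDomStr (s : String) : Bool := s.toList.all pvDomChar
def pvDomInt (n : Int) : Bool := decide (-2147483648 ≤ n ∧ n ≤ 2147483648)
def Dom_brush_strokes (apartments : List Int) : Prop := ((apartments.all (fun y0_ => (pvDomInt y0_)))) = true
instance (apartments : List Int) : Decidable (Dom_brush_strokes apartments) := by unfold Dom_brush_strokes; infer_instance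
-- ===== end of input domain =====

-- B replaces A's row-by-row repainting simulation by a single O(n) pass summing the positive
-- height increases (heights clamped at 0); equal return values are proved on Pre_.

-- ===== PORT A =====
def floors (apartments : List Int) : List (List Bool) :=
  let max_floor : Int := (PySem.List.max? apartments id).getD 0   -- max(apartments); raises on [] (excluded by Pre_)
  (PySem.List.pyRange 1 (max_floor + 1)).foldl (fun answer heigth =>
    let floor : List Bool :=
      (PySem.List.pyRange 0 (PySem.List.len apartments)).foldl (fun floor order =>
        if PySem.List.pyGetD apartments order 0 ≥ heigth then floor ++ [true] else floor ++ [false]) []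
    PySem.List.insert answer 0 floor) []

def brush_strokes (apartments : List Int) : Int :=
  let values := floors apartments
  values.foldl (fun total v =>
    let cnt : Int :=
      (PySem.List.enumerate (PySem.List.slice v none (some (-1)))).foldl (fun cnt p =>
        if !p.2 then cnt
        else if p.2 && ((PySem.List.pyGetD v (p.1 + 1) false) == false
                        || (PySem.List.len (PySem.List.slice v none (some (-1))) - 1) == p.1)
          then cnt + 1 else cnt) 0
    -- v[-1] / v[-2]: raises on rows of length < 2 (excluded by Pre_)
    let cnt : Int :=
      if PySem.List.pyGetD v (-1) false && !(PySem.List.pyGetD v (-2) false) then cnt + 1 else cnt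
    total + cnt) 0

-- ===== PORT B =====
def brush_strokes_alt (apartments : List Int) : Int :=
  (apartments.foldl (fun (st : Int × Int) x =>
    let h := max x 0
    if h > st.2 then (st.1 + (h - st.2), h) else (st.1, h)) (0, 0)).1

-- ===== PRECONDITION & SPEC =====
-- Pre_ excludes exactly the inputs where A raises: the empty list (ValueError in max) and a
-- one-element list with a positive height (IndexError from v[-2]).
def Pre_brush_strokes (apartments : List Int) : Prop :=
  apartments ≠ [] ∧ (2 ≤ apartments.length ∨ ∀ x ∈ apartments, x ≤ 0)
instance (apartments : List Int) : Decidable (Pre_brush_strokes apartments) := by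
  unfold Pre_brush_strokes; infer_instance
def pvWitness_brush_strokes : List Int := [3, 1, 4]

def Spec_brush_strokes (apartments : List Int) (out : Int) : Prop := out = brush_strokes_alt apartments
instance (apartments : List Int) (out : Int) : Decidable (Spec_brush_strokes apartments out) := by
  unfold Spec_brush_strokes; infer_instance

-- ===== CLAIM (what is proved, stated in full; the proofs are below) =====
def Claim_equal_brush_strokes : Prop := ∀ (apartments : List Int), Dom_brush_strokes apartments → Pre_brush_strokes apartments → Spec_brush_strokes apartments (brush_strokes apartments)

-- ===== LEMMAS AND PROOFS =====

-- run-start counter on a boolean row, prev = previous cell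
def rsB (prev : Bool) : List Bool → Int
  | [] => 0
  | b :: t => (if b && !prev then 1 else 0) + rsB b t

-- run-end counter, the two-cell-window shape A's per-row loop follows
def reB : List Bool → Int
  | [] => 0
  | [b] => if b then 1 else 0
  | x :: y :: w => (if x && !y then 1 else 0) + reB (y :: w)

-- run-start counter directly on heights: a run at level h starts where prev < h ≤ x
def rsI (h : Int) (p : Int) : List Int → Int
  | [] => 0
  | x :: t => (if x ≥ h ∧ ¬(p ≥ h) then 1 else 0) + rsI h x t

-- B's accumulator, total only
def altFold (p : Int) : List Int → Int
  | [] => 0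
  | x :: t => (if max x 0 > p then max x 0 - p else 0) + altFold (max x 0) t

-- A's per-row count, exactly the body of the fold in brush_strokes
def cntRow (v : List Bool) : Int :=
  let cnt : Int :=
    (PySem.List.enumerate (PySem.List.slice v none (some (-1)))).foldl (fun cnt p =>
      if !p.2 then cnt
      else if p.2 && ((PySem.List.pyGetD v (p.1 + 1) false) == false
                      || (PySem.List.len (PySem.List.slice v none (some (-1))) - 1) == p.1)
        then cnt + 1 else cnt) 0
  if PySem.List.pyGetD v (-1) false && !(PySem.List.pyGetD v (-2) false) then cnt + 1 else cnt

theorem insert_zero {α : Type} (xs : List α) (x : α) : PySem.List.insert xs 0 x = x :: xs := by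
  have := PySem.List.insert_natCast (α := α) xs 0 x; simp at this; simpa using this

theorem foldl_cons_rev {α β : Type} (f : α → β) (l : List α) (init : List β) :
    l.foldl (fun acc x => f x :: acc) init = (l.map f).reverse ++ init := by
  induction l generalizing init <;> simp_all

theorem inner_floor (a : List Int) (h : Int) :
    (PySem.List.pyRange 0 (PySem.List.len a)).foldl (fun floor order =>
        if PySem.List.pyGetD a order 0 ≥ h then floor ++ [true] else floor ++ [false]) []
      = a.map (fun x => decide (x ≥ h)) := by
  rw [PySem.List.foldl_congr_mem _ _
      (fun floor order => floor ++ [decide (PySem.List.pyGetD a order 0 ≥ h)]) []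
      (by intro acc x _; by_cases hc : PySem.List.pyGetD a x 0 ≥ h <;> simp [hc])]
  rw [PySem.List.foldl_pyRange_zero_pyGetD a 0 (fun fl x => fl ++ [decide (x ≥ h)]) []]
  simpa using PySem.List.foldl_append_singleton_eq_map (fun x => decide (x ≥ h)) a []

theorem floors_eq (a : List Int) :
    floors a = ((PySem.List.pyRange 1 ((PySem.List.max? a id).getD 0 + 1)).map
      (fun h => a.map (fun x => decide (x ≥ h)))).reverse := by
  unfold floors
  rw [PySem.List.foldl_congr_mem _ _
      (fun answer h => (a.map (fun x => decide (x ≥ h))) :: answer) []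
      (by intro acc h _; simp only [inner_floor, insert_zero])]
  rw [foldl_cons_rev]
  simp

theorem brush_strokes_eq_sum (a : List Int) :
    brush_strokes a = ((floors a).map cntRow).sum := by
  show List.foldl (fun total v => total + cntRow v) 0 (floors a) = _
  simpa using PySem.List.foldl_add (floors a) cntRow 0

-- contribution of one enumerate step of A's inner loop
def incv (v : List Bool) (p : Int × Bool) : Int :=
  if p.2 && ((PySem.List.pyGetD v (p.1 + 1) false) == false
             || (PySem.List.len (PySem.List.slice v none (some (-1))) - 1) == p.1) then 1 else 0

theorem enumShift {α : Type} (xs : List α) (s : Int) :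
    PySem.List.enumerate xs (s + 1) = (PySem.List.enumerate xs s).map (fun p => (p.1 + 1, p.2)) := by
  induction xs generalizing s <;> simp_all [PySem.List.enumerate_cons]

theorem cntMain_sum (v : List Bool) :
    (PySem.List.enumerate (PySem.List.slice v none (some (-1)))).foldl (fun cnt p =>
        if !p.2 then cnt
        else if p.2 && ((PySem.List.pyGetD v (p.1 + 1) false) == false
                        || (PySem.List.len (PySem.List.slice v none (some (-1))) - 1) == p.1)
          then cnt + 1 else cnt) 0
      = ((PySem.List.enumerate (PySem.List.slice v none (some (-1)))).map (incv v)).sum := by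
  rw [PySem.List.foldl_congr_mem _ _ (fun cnt p => cnt + incv v p) 0 ?_]
  · simpa using PySem.List.foldl_add _ (incv v) 0
  · intro acc p _
    obtain ⟨i, b⟩ := p
    cases b
    · simp [incv]
    · simp only [incv, Bool.not_true, Bool.true_and]
      split_ifs <;> simp_all

theorem cntRow_split (v : List Bool) :
    cntRow v = ((PySem.List.enumerate (PySem.List.slice v none (some (-1)))).map (incv v)).sum
      + (if PySem.List.pyGetD v (-1) false && !(PySem.List.pyGetD v (-2) false) then (1:Int) else 0) := by
  unfold cntRow
  rw [cntMain_sum]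
  by_cases hF : (PySem.List.pyGetD v (-1) false && !(PySem.List.pyGetD v (-2) false)) = true <;>
    simp [hF]

theorem beq_congr {a b c d : Int} (h : (a = b) ↔ (c = d)) : (a == b) = (c == d) := by
  by_cases hab : a = b
  · simp [hab, h.1 hab]
  · have hcd : ¬(c = d) := fun hc => hab (h.2 hc)
    simp [hab, hcd]

theorem incv_shift (x : Bool) (u : List Bool) (k : Nat) (b : Bool) :
    incv (x :: u) ((k : Int) + 1, b) = incv u ((k : Int), b) := by
  simp only [incv, PySem.List.slice_to_neg_one]
  have e2 : ((k : Int) + 1 + 1) = ((k + 2 : Nat) : Int) := by push_cast; ring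
  have e1 : ((k : Int) + 1) = ((k + 1 : Nat) : Int) := by push_cast; ring
  rw [e2, PySem.List.pyGetD_natCast]
  conv_rhs => rw [e1, PySem.List.pyGetD_natCast]
  rw [show k + 2 = (k + 1) + 1 from rfl, List.getD_cons_succ]
  congr 2
  congr 2
  apply beq_congr
  simp only [PySem.List.len_eq, List.length_dropLast, List.length_cons]
  omega

theorem incv_head (x y : Bool) (u : List Bool) (hu : u ≠ []) :
    incv (x :: y :: u) ((0 : Int), x) = if x && !y then 1 else 0 := by
  have hlen : 1 ≤ u.length := List.length_pos_iff.2 hu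
  simp only [incv, PySem.List.slice_to_neg_one]
  rw [show ((0 : Int) + 1) = ((1 : Nat) : Int) by norm_num, PySem.List.pyGetD_natCast]
  have hc : ((PySem.List.len (x :: y :: u).dropLast - 1 : Int) == (0 : Int)) = false := by
    simp only [PySem.List.len_eq, List.length_dropLast, List.length_cons, beq_eq_false_iff_ne,
      ne_eq]
    omega
  rw [hc]
  cases x <;> cases y <;> simp [List.getD]

theorem final_cons (x : Bool) (u : List Bool) (hu : 2 ≤ u.length) :
    (if PySem.List.pyGetD (x :: u) (-1) false && !(PySem.List.pyGetD (x :: u) (-2) false) then (1:Int) else 0)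
      = (if PySem.List.pyGetD u (-1) false && !(PySem.List.pyGetD u (-2) false) then (1:Int) else 0) := by
  have hne : u ≠ [] := by intro h; subst h; simp at hu
  have h1 : PySem.List.pyGetD (x :: u) (-1) false = PySem.List.pyGetD u (-1) false := by
    rw [PySem.List.pyGetD_neg_one _ _ (List.cons_ne_nil x u), PySem.List.pyGetD_neg_one _ _ hne]
    exact List.getLast_cons hne
  have h2 : PySem.List.pyGetD (x :: u) (-2) false = PySem.List.pyGetD u (-2) false := by
    rw [PySem.List.pyGetD_neg_ofNat (x :: u) 2 false (by omega) (by simp; omega),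
        PySem.List.pyGetD_neg_ofNat u 2 false (by omega) (by omega)]
    have hi : (x :: u).length - 2 = (u.length - 2) + 1 := by simp; omega
    simp only [hi, List.getElem_cons_succ]
  rw [h1, h2]

theorem incv_sum_cons (x y z : Bool) (w : List Bool) :
    ((PySem.List.enumerate (PySem.List.slice (x :: y :: z :: w) none (some (-1)))).map
        (incv (x :: y :: z :: w))).sum
      = incv (x :: y :: z :: w) (0, x)
        + ((PySem.List.enumerate (PySem.List.slice (y :: z :: w) none (some (-1)))).map
            (incv (y :: z :: w))).sum := by
  simp only [PySem.List.slice_to_neg_one]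
  rw [show (x :: y :: z :: w).dropLast = x :: (y :: z :: w).dropLast from rfl]
  rw [PySem.List.enumerate_cons, List.map_cons, List.sum_cons]
  congr 1
  rw [enumShift, List.map_map]
  refine congrArg _ (List.map_congr_left ?_)
  intro p hp
  rcases (PySem.List.mem_enumerate_iff _ _ _).1 hp with ⟨k, hk, rfl⟩
  simpa using incv_shift x (y :: z :: w) k _

theorem cntRow_cons (x y z : Bool) (w : List Bool) :
    cntRow (x :: y :: z :: w) = (if x && !y then 1 else 0) + cntRow (y :: z :: w) := by
  rw [cntRow_split, cntRow_split, incv_sum_cons, incv_head x y (z :: w) (List.cons_ne_nil z w),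
      final_cons x (y :: z :: w) (by simp)]
  ring

theorem cntRow_eq_reB (v : List Bool) (hv : 2 ≤ v.length) : cntRow v = reB v := by
  induction v with
  | nil => simp at hv
  | cons x u ih =>
    match u, ih with
    | [], _ => simp at hv
    | [y], _ => cases x <;> cases y <;> decide
    | y :: z :: w, ih =>
      rw [cntRow_cons, ih (by simp)]
      rfl

theorem reB_eq_rsB (v : List Bool) (b : Bool) : reB (b :: v) = (if b then 1 else 0) + rsB b v := by
  induction v generalizing b with
  | nil => simp [reB, rsB]
  | cons c t ih => rw [reB, ih, rsB]; cases b <;> cases c <;> simp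

theorem rsB_map (a : List Int) (h : Int) : ∀ p : Int,
    rsB (decide (p ≥ h)) (a.map (fun x => decide (x ≥ h))) = rsI h p a := by
  induction a with
  | nil => intro p; simp [rsB, rsI]
  | cons x t ih => intro p; simp only [List.map_cons, rsB, rsI, ih]; congr 1; by_cases hx : x ≥ h <;> by_cases hp : p ≥ h <;> simp [hx, hp]

theorem rsI_head_congr (h p q : Int) (t : List Int) (hpq : p ≥ h ↔ q ≥ h) :
    rsI h p t = rsI h q t := by
  cases t with
  | nil => rfl
  | cons x w => simp only [rsI]; congr 1; by_cases hx : x ≥ h <;> simp [hx, hpq]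

theorem indicator_sum (M p x : Int) (hp : 0 ≤ p) (hpM : p ≤ M) (hxM : x ≤ M) :
    ((PySem.List.pyRange 1 (M + 1)).map (fun h => if x ≥ h ∧ ¬(p ≥ h) then (1 : Int) else 0)).sum
      = if max x 0 > p then max x 0 - p else 0 := by
  by_cases hb : max x 0 > p
  · rw [if_pos hb]
    rw [PySem.List.pyRange_one_append 1 (p + 1) (M + 1) (by omega) (by omega),
        PySem.List.pyRange_one_append (p + 1) (max x 0 + 1) (M + 1) (by omega) (by omega)]
    rw [List.map_append, List.map_append, List.sum_append, List.sum_append]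
    rw [List.map_congr_left (g := fun _ => (0 : Int)) (fun h hh => by
          have := (PySem.List.mem_pyRange_one).1 hh
          rw [if_neg (by omega)]),
        List.map_congr_left (l := PySem.List.pyRange (p + 1) (max x 0 + 1) 1)
          (g := fun _ => (1 : Int)) (fun h hh => by
          have := (PySem.List.mem_pyRange_one).1 hh
          rw [if_pos (by omega)]),
        List.map_congr_left (l := PySem.List.pyRange (max x 0 + 1) (M + 1) 1)
          (g := fun _ => (0 : Int)) (fun h hh => by
          have := (PySem.List.mem_pyRange_one).1 hh
          rw [if_neg (by omega)])]
    rw [PySem.List.sum_map_const_int, PySem.List.sum_map_const_int, PySem.List.sum_map_const_int]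
    simp only [PySem.List.length_pyRange_one]
    omega
  · rw [if_neg hb]
    rw [List.map_congr_left (g := fun _ => (0 : Int)) (fun h hh => by
          have := (PySem.List.mem_pyRange_one).1 hh
          rw [if_neg (by omega)])]
    simp

theorem swap_sum (M : Int) : ∀ (t : List Int) (p : Int), 0 ≤ p → p ≤ M →
    (∀ x ∈ t, x ≤ M) →
    ((PySem.List.pyRange 1 (M + 1)).map (fun h => rsI h p t)).sum = altFold p t := by
  intro t
  induction t with
  | nil => intro p _ _ _; simp [rsI, altFold]
  | cons x w ih =>
    intro p hp hpM hall
    have hxM : x ≤ M := hall x (List.mem_cons_self)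
    calc ((PySem.List.pyRange 1 (M + 1)).map (fun h => rsI h p (x :: w))).sum
        = ((PySem.List.pyRange 1 (M + 1)).map
            (fun h => (if x ≥ h ∧ ¬(p ≥ h) then (1:Int) else 0) + rsI h (max x 0) w)).sum := by
          refine congrArg _ (List.map_congr_left ?_)
          intro h hh
          have h1 : 1 ≤ h := ((PySem.List.mem_pyRange_one).1 hh).1
          rw [rsI]
          congr 1
          exact rsI_head_congr h x (max x 0) w (by constructor <;> intro <;> omega)
      _ = ((PySem.List.pyRange 1 (M + 1)).map (fun h => if x ≥ h ∧ ¬(p ≥ h) then (1:Int) else 0)).sum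
          + ((PySem.List.pyRange 1 (M + 1)).map (fun h => rsI h (max x 0) w)).sum :=
          PySem.List.sum_map_add_int _ _ _
      _ = (if max x 0 > p then max x 0 - p else 0) + altFold (max x 0) w := by
          rw [indicator_sum M p x hp hpM hxM,
              ih (max x 0) (by omega) (by omega) (fun y hy => hall y (List.mem_cons_of_mem _ hy))]
      _ = altFold p (x :: w) := by rw [altFold]

theorem alt_eq_altFold (a : List Int) : ∀ (t p : Int), 0 ≤ p →
    (a.foldl (fun (st : Int × Int) x =>
      let h := max x 0
      if h > st.2 then (st.1 + (h - st.2), h) else (st.1, h)) (t, p)).1 = t + altFold p a := by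
  induction a with
  | nil => intro t p _; simp [altFold]
  | cons x w ih =>
    intro t p hp
    simp only [List.foldl_cons, altFold]
    by_cases hc : max x 0 > p <;> simp only [hc, ite_true, ite_false] <;>
      rw [ih _ _ (by omega)] <;> ring

theorem altFold_nonpos : ∀ (a : List Int) (p : Int), 0 ≤ p → (∀ x ∈ a, x ≤ 0) → altFold p a = 0 := by
  intro a
  induction a with
  | nil => intro p _ _; rfl
  | cons x w ih =>
    intro p hp hall
    have hx : x ≤ 0 := hall x (List.mem_cons_self)
    rw [altFold]
    have h0 : max x 0 = 0 := by omega
    rw [h0, if_neg (by omega), ih 0 le_rfl (fun y hy => hall y (List.mem_cons_of_mem _ hy))]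
    simp

-- ===== VERDICT (by name: the statement is the Claim_ definition above) =====
theorem cntRow_eq_rsB (v : List Bool) (hv : 2 ≤ v.length) : cntRow v = rsB false v := by
  rw [cntRow_eq_reB v hv]
  cases v with
  | nil => simp at hv
  | cons b t => rw [reB_eq_rsB, rsB]; simp

theorem brush_strokes_spec : Claim_equal_brush_strokes := by
  unfold Claim_equal_brush_strokes
  intro a _ hpre
  unfold Spec_brush_strokes
  rcases hpre with ⟨hne, hcase⟩
  cases hmax : PySem.List.max? a id with
  | none => exact absurd ((PySem.List.max?_eq_none_iff a id).1 hmax) hne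
  | some m =>
    have hmem : m ∈ a := PySem.List.max?_mem hmax
    have hle : ∀ y ∈ a, y ≤ m := fun y hy => PySem.List.max?_isMax hmax y hy
    have halt : brush_strokes_alt a = altFold 0 a := by
      unfold brush_strokes_alt
      simpa using alt_eq_altFold a 0 0 le_rfl
    rw [brush_strokes_eq_sum, floors_eq, hmax]
    simp only [Option.getD_some]
    rw [List.map_reverse, List.sum_reverse, List.map_map]
    by_cases hM : 1 ≤ m
    · have hlen2 : 2 ≤ a.length := by
        rcases hcase with h2 | hall
        · exact h2
        · exact absurd (hall m hmem) (by omega)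
      rw [List.map_congr_left (g := fun h => rsI h 0 a) ?_]
      · rw [swap_sum m a 0 le_rfl (by omega) hle, halt]
      · intro h hh
        have h1 : 1 ≤ h := ((PySem.List.mem_pyRange_one).1 hh).1
        simp only [Function.comp]
        rw [cntRow_eq_rsB _ (by simpa using hlen2)]
        rw [show (false : Bool) = decide ((0:Int) ≥ h) by simp; omega]
        exact rsB_map a h 0
    · rw [PySem.List.pyRange_one_eq_nil (by omega)]
      simp only [List.map_nil, List.sum_nil]
      rw [halt, altFold_nonpos a 0 le_rfl (fun y hy => le_trans (hle y hy) (by omega))]
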